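-- pv_equiv track=rewrite | github.com/snpan22/EOH-2025-SW | mighty_mouse_software/mms_python_files/Main.py | manhattan_nowall
-- ===== SOURCE A (Python) =====
-- def manhattan_nowall(maze):
--   #split maze into 4 quadrants and fill as if no walls are there
--     dim = len(maze[0])
--     val = 0
--     row_inc = -1
--     for i in range((int) (dim/2-1), -1, -1):
--         row_inc+=1
--         val = row_inc
--         for j in range((int) (dim/2-1), -1, -1):
--             maze[i][j] = val
--             val = val+1
--     val = 0
--     row_inc = -1
--     for i in range((int) (dim/2-1), -1, -1):
--         row_inc+=1
--         val = row_inc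
--         for j in range((int) (dim/2), dim):
--             maze[i][j] = val
--             val = val+1
--     val = 0
--     row_inc = -1
--     for i in range((int) (dim/2), dim):
--         row_inc+=1
--         val = row_inc
--         for j in range((int) (dim/2-1), -1, -1):
--             maze[i][j] = val
--             val = val+1
--     val = 0
--     row_inc = -1
--     for i in range((int)(dim/2), dim):
--         row_inc+=1
--         val = row_inc
--         for j in range((int) (dim/2), dim):
--             maze[i][j] = val
--             val = val+1
--     return maze
-- ===== SOURCE B (Python) =====
-- def manhattan_nowall(maze):
--     # One unified pass: each cell gets its Manhattan distance to the nearest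
--     # center cell (closed form), instead of four quadrant loops with counters.
--     # Like A, mutates maze in place and returns it.
--     dim = len(maze[0])
--     half = dim // 2
--     for i in range(dim):
--         cr = half - 1 if i < half else half
--         row = maze[i]
--         for j in range(dim):
--             cc = half - 1 if j < half else half
--             row[j] = abs(i - cr) + abs(j - cc)
--     return maze
-- ===== Notes on version B (the rewrite author's own statement) =====
-- stated objective: simpler
-- what changed: Replaces A's four quadrant passes driven by val/row_inc counters with a single nested loop that writes each cell's closed-form Manhattan distance to its nearest centre cell.
import Mathlib
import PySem

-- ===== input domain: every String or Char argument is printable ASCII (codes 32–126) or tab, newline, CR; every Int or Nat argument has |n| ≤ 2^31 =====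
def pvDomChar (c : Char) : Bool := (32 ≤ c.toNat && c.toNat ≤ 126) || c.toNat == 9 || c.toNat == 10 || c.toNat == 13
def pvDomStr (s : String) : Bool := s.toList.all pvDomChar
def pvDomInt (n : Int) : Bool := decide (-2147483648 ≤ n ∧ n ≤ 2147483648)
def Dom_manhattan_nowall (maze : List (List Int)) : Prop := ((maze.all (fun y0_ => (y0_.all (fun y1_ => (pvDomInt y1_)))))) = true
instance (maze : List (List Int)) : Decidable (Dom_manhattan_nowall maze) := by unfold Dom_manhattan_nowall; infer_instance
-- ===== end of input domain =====

-- B replaces A's four quadrant passes with counters by one unified pass writing the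
-- closed-form Manhattan distance to the nearest centre cell (objective: simpler).
-- Both Pythons mutate `maze` in place and return it; the mutation is the same, and the
-- theorems below are about the returned value.

-- ===== PORT A =====
-- maze[i][j] = v.  Every index reaching this helper comes from the nonnegative parts of
-- A's ranges, so .toNat is exact; out-of-range writes raise IndexError in Python and are
-- excluded by Pre_.
def pySet2 (m : List (List Int)) (i j : Int) (v : Int) : List (List Int) :=
  m.modify i.toNat (fun row => row.set j.toNat v)

-- one quadrant pass of A: fold state = (maze, row_inc); val is reset to row_inc at each
-- row and incremented per cell, exactly as in the Python loops
def passGo (cols : List Int) (rows : List Int) (m : List (List Int)) (r : Int) :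
    List (List Int) :=
  (rows.foldl
    (fun (st : List (List Int) × Int) i =>
      ((cols.foldl
          (fun (st2 : List (List Int) × Int) j =>
            (pySet2 st2.1 i j st2.2, st2.2 + 1))
          (st.1, st.2 + 1)).1,
       st.2 + 1))
    (m, r)).1

def manhattan_nowall (maze : List (List Int)) : List (List Int) :=
  -- dim = len(maze[0]); maze = [] raises IndexError and is excluded by Pre_
  let dim : Int := ((maze.headD []).length : Int)
  let s : Int := Int.tdiv (dim - 2) 2          -- (int)(dim/2 - 1): float truncation toward zero
  let h : Int := Int.tdiv dim 2                -- (int)(dim/2)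
  let m1 := passGo (PySem.List.pyRange s (-1) (-1)) (PySem.List.pyRange s (-1) (-1)) maze (-1)
  let m2 := passGo (PySem.List.pyRange h dim 1) (PySem.List.pyRange s (-1) (-1)) m1 (-1)
  let m3 := passGo (PySem.List.pyRange s (-1) (-1)) (PySem.List.pyRange h dim 1) m2 (-1)
  passGo (PySem.List.pyRange h dim 1) (PySem.List.pyRange h dim 1) m3 (-1)

-- ===== PORT B =====
def manhattan_nowall_alt (maze : List (List Int)) : List (List Int) :=
  let dim : Int := ((maze.headD []).length : Int)
  let half : Int := PySem.Int.floordiv dim 2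
  (PySem.List.pyRange 0 dim 1).foldl
    (fun (m : List (List Int)) (i : Int) =>
      let cr : Int := if i < half then half - 1 else half
      let row := (PySem.List.pyGet? m i).getD []
      let row' := (PySem.List.pyRange 0 dim 1).foldl
        (fun r j =>
          let cc : Int := if j < half then half - 1 else half
          r.set j.toNat (|i - cr| + |j - cc|)) row
      m.set i.toNat row')
    maze

-- ===== PRECONDITION & SPEC =====
-- Exactly where Python A returns: A raises IndexError on an empty maze, and when the
-- grid has fewer than dim = len(maze[0]) rows or one of the first dim rows has fewer
-- than dim entries (the quadrant writes then index out of range).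
def Pre_manhattan_nowall (maze : List (List Int)) : Prop :=
  maze ≠ [] ∧ (maze.headD []).length ≤ maze.length ∧
    ∀ r ∈ maze.take (maze.headD []).length, (maze.headD []).length ≤ r.length

instance (maze : List (List Int)) : Decidable (Pre_manhattan_nowall maze) := by
  unfold Pre_manhattan_nowall; infer_instance

def pvWitness_manhattan_nowall : List (List Int) := [[7, 7], [7, 7]]

def Spec_manhattan_nowall (maze : List (List Int)) (out : List (List Int)) : Prop := out = manhattan_nowall_alt maze
instance (maze : List (List Int)) (out : List (List Int)) : Decidable (Spec_manhattan_nowall maze out) := by unfold Spec_manhattan_nowall; infer_instance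

-- ===== CLAIM (what is proved, stated in full; the proofs are below) =====
def Claim_equal_manhattan_nowall : Prop := ∀ (maze : List (List Int)), Dom_manhattan_nowall maze → Pre_manhattan_nowall maze → Spec_manhattan_nowall maze (manhattan_nowall maze)

-- ===== LEMMAS AND PROOFS =====

-- does cell (a, b) exist in grid m?
def Sh (m : List (List Int)) (a b : Nat) : Bool := b < (m.map List.length).getD a 0

-- grid lookup
def gget (m : List (List Int)) (a b : Nat) : Option Int := m[a]?.bind fun r => r[b]?

lemma grid_ext {m m' : List (List Int)} (hlen : m.map List.length = m'.map List.length)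
    (h : ∀ a b, gget m a b = gget m' a b) : m = m' := by
  apply List.ext_getElem?
  intro a
  have hl : (m.map List.length)[a]? = (m'.map List.length)[a]? := by rw [hlen]
  simp only [List.getElem?_map] at hl
  cases hm : m[a]? with
  | none => cases hm' : m'[a]? with
    | none => rfl
    | some r' => rw [hm, hm'] at hl; simp at hl
  | some r =>
    cases hm' : m'[a]? with
    | none => rw [hm, hm'] at hl; simp at hl
    | some r' =>
      rw [hm, hm'] at hl
      simp only [Option.map_some, Option.some.injEq] at hl
      have hrow : r = r' := by
        apply List.ext_getElem?
        intro b
        have := h a b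
        simpa [gget, hm, hm'] using this
      rw [hrow]

lemma shape_pySet2 (m : List (List Int)) (i j v) :
    (pySet2 m i j v).map List.length = m.map List.length := by
  apply List.ext_getElem?
  intro a
  simp only [List.getElem?_map, pySet2, List.getElem?_modify]
  split
  · cases m[a]? <;> simp
  · simp

lemma gget_pySet2 (m : List (List Int)) (i j : Int) (v : Int) (a b : Nat) :
    gget (pySet2 m i j v) a b =
      if a = i.toNat ∧ b = j.toNat ∧ Sh m a b then some v else gget m a b := by
  by_cases ha : a = i.toNat
  · have h1 : i.toNat = a := ha.symm
    cases hm : m[a]? with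
    | none =>
      have hsh : Sh m a b = false := by
        simp [Sh, List.getD, List.getElem?_map, hm]
      simp [gget, pySet2, List.getElem?_modify, h1, hm, hsh]
    | some r =>
      have hsh : (Sh m a b : Prop) ↔ b < r.length := by
        simp [Sh, List.getD, List.getElem?_map, hm]
      have hlhs : gget (pySet2 m i j v) a b = (r.set j.toNat v)[b]? := by
        simp [gget, pySet2, List.getElem?_modify, h1, hm]
      rw [hlhs, List.getElem?_set]
      by_cases hb : b = j.toNat
      · rw [if_pos hb.symm]
        rw [hb] at hsh ⊢
        by_cases hr : j.toNat < r.length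
        · rw [if_pos hr, if_pos ⟨ha, rfl, hsh.mpr hr⟩]
        · rw [if_neg hr, if_neg (by rintro ⟨-, -, h⟩; exact hr (hsh.mp h))]
          simp [gget, hm, List.getElem?_eq_none, Nat.le_of_not_lt hr]
      · have hb' : j.toNat ≠ b := fun h => hb h.symm
        simp [hb, hb', gget, hm]
  · have ha' : i.toNat ≠ a := fun h => ha h.symm
    simp [gget, pySet2, List.getElem?_modify, ha, ha']

def innerGo (i : Int) (cols : List Int) (m : List (List Int)) (v : Int) :
    List (List Int) × Int :=
  cols.foldl (fun (st2 : List (List Int) × Int) j => (pySet2 st2.1 i j st2.2, st2.2 + 1)) (m, v)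

lemma innerGo_cons (i c : Int) (cols : List Int) (m v) :
    innerGo i (c :: cols) m v = innerGo i cols (pySet2 m i c v) (v + 1) := rfl

lemma shape_innerGo (i : Int) (cols : List Int) :
    ∀ m v, ((innerGo i cols m v).1).map List.length = m.map List.length := by
  induction cols with
  | nil => intro m v; rfl
  | cons c cols ih =>
    intro m v
    rw [innerGo_cons, ih, shape_pySet2]

lemma innerDesc (n : Nat) : ∀ (s i : Int), s < (n : Int) →
    ∀ m v (a b : Nat),
    gget ((innerGo i (PySem.List.pyRange s (-1) (-1)) m v).1) a b =
      if a = i.toNat ∧ (b : Int) ≤ s ∧ Sh m a b then some (v + (s - (b : Int)))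
      else gget m a b := by
  induction n with
  | zero =>
    intro s i hs m v a b
    rw [PySem.List.pyRange_neg_one_eq_nil (by omega)]
    rw [if_neg (by rintro ⟨-, h, -⟩; omega)]
    rfl
  | succ n ih =>
    intro s i hs m v a b
    by_cases hneg : s < 0
    · rw [PySem.List.pyRange_neg_one_eq_nil (by omega)]
      rw [if_neg (by rintro ⟨-, h, -⟩; omega)]
      rfl
    · rw [PySem.List.pyRange_neg_one_cons (by omega), innerGo_cons]
      rw [ih (s - 1) i (by omega)]
      rw [gget_pySet2]
      have hSh : Sh (pySet2 m i s v) a b = Sh m a b := by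
        unfold Sh; rw [shape_pySet2]
      rw [hSh]
      by_cases hA : a = i.toNat
      · by_cases hS : Sh m a b = true
        · rw [hA] at hS
          simp only [hA, hS, eq_self_iff_true, true_and, and_true]
          split_ifs with h1 h2 h3 h3 <;>
            first
            | rfl
            | exact congrArg some (by omega)
            | (exfalso; omega)
        · simp [hS]
      · simp [hA]

lemma innerAsc (n : Nat) : ∀ (lo hi i : Int), hi - lo < (n : Int) → 0 ≤ lo →
    ∀ m v (a b : Nat),
    gget ((innerGo i (PySem.List.pyRange lo hi 1) m v).1) a b =
      if a = i.toNat ∧ lo ≤ (b : Int) ∧ (b : Int) < hi ∧ Sh m a b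
      then some (v + ((b : Int) - lo)) else gget m a b := by
  induction n with
  | zero =>
    intro lo hi i hn hlo m v a b
    rw [PySem.List.pyRange_one_eq_nil (by omega)]
    rw [if_neg (by rintro ⟨-, h1, h2, -⟩; omega)]
    rfl
  | succ n ih =>
    intro lo hi i hn hlo m v a b
    by_cases hend : hi ≤ lo
    · rw [PySem.List.pyRange_one_eq_nil (by omega)]
      rw [if_neg (by rintro ⟨-, h1, h2, -⟩; omega)]
      rfl
    · rw [PySem.List.pyRange_one_cons (by omega), innerGo_cons]
      rw [ih (lo + 1) hi i (by omega) (by omega)]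
      rw [gget_pySet2]
      have hSh : Sh (pySet2 m i lo v) a b = Sh m a b := by
        unfold Sh; rw [shape_pySet2]
      rw [hSh]
      by_cases hA : a = i.toNat
      · by_cases hS : Sh m a b = true
        · rw [hA] at hS
          simp only [hA, hS, eq_self_iff_true, true_and, and_true]
          split_ifs with h1 h2 h3 h3 <;>
            first
            | rfl
            | exact congrArg some (by omega)
            | (exfalso; omega)
        · simp [hS]
      · simp [hA]

lemma passGo_cons (cols : List Int) (i : Int) (rows : List Int) (m r) :
    passGo cols (i :: rows) m r = passGo cols rows ((innerGo i cols m (r + 1)).1) (r + 1) := rfl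

lemma shape_passGo (cols rows : List Int) :
    ∀ m r, (passGo cols rows m r).map List.length = m.map List.length := by
  induction rows with
  | nil => intro m r; rfl
  | cons i rows ih =>
    intro m r
    rw [passGo_cons, ih, shape_innerGo]

lemma outerDesc (C : Nat → Prop) [DecidablePred C] (g : Nat → Int) (cols : List Int)
    (hcols : ∀ i m v a b, gget ((innerGo i cols m v).1) a b =
      if a = i.toNat ∧ C b ∧ Sh m a b then some (v + g b) else gget m a b)
    (n : Nat) : ∀ (s : Int), s < (n : Int) → ∀ m r (a b : Nat),
    gget (passGo cols (PySem.List.pyRange s (-1) (-1)) m r) a b =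
      if (a : Int) ≤ s ∧ C b ∧ Sh m a b
      then some ((r + 1 + (s - (a : Int))) + g b) else gget m a b := by
  induction n with
  | zero =>
    intro s hn m r a b
    rw [PySem.List.pyRange_neg_one_eq_nil (by omega)]
    rw [if_neg (by rintro ⟨h, -, -⟩; omega)]
    rfl
  | succ n ih =>
    intro s hn m r a b
    by_cases hneg : s < 0
    · rw [PySem.List.pyRange_neg_one_eq_nil (by omega)]
      rw [if_neg (by rintro ⟨h, -, -⟩; omega)]
      rfl
    · rw [PySem.List.pyRange_neg_one_cons (by omega), passGo_cons]
      rw [ih (s - 1) (by omega)]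
      rw [hcols s m (r + 1) a b]
      have hSh : Sh ((innerGo s cols m (r + 1)).1) a b = Sh m a b := by
        unfold Sh; rw [shape_innerGo]
      rw [hSh]
      by_cases hC : C b
      · by_cases hS : Sh m a b = true
        · simp only [hC, hS, eq_self_iff_true, true_and, and_true]
          split_ifs with h1 h2 h3 h3 <;>
            first
            | rfl
            | exact congrArg some (by omega)
            | (exfalso; omega)
        · simp [hS]
      · simp [hC]

lemma outerAsc (C : Nat → Prop) [DecidablePred C] (g : Nat → Int) (cols : List Int)
    (hcols : ∀ i m v a b, gget ((innerGo i cols m v).1) a b =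
      if a = i.toNat ∧ C b ∧ Sh m a b then some (v + g b) else gget m a b)
    (n : Nat) : ∀ (lo hi : Int), hi - lo < (n : Int) → 0 ≤ lo → ∀ m r (a b : Nat),
    gget (passGo cols (PySem.List.pyRange lo hi 1) m r) a b =
      if lo ≤ (a : Int) ∧ (a : Int) < hi ∧ C b ∧ Sh m a b
      then some ((r + 1 + ((a : Int) - lo)) + g b) else gget m a b := by
  induction n with
  | zero =>
    intro lo hi hn hlo m r a b
    rw [PySem.List.pyRange_one_eq_nil (by omega)]
    rw [if_neg (by rintro ⟨h1, h2, -, -⟩; omega)]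
    rfl
  | succ n ih =>
    intro lo hi hn hlo m r a b
    by_cases hend : hi ≤ lo
    · rw [PySem.List.pyRange_one_eq_nil (by omega)]
      rw [if_neg (by rintro ⟨h1, h2, -, -⟩; omega)]
      rfl
    · rw [PySem.List.pyRange_one_cons (by omega), passGo_cons]
      rw [ih (lo + 1) hi (by omega) (by omega)]
      rw [hcols lo m (r + 1) a b]
      have hSh : Sh ((innerGo lo cols m (r + 1)).1) a b = Sh m a b := by
        unfold Sh; rw [shape_innerGo]
      rw [hSh]
      by_cases hC : C b
      · by_cases hS : Sh m a b = true
        · simp only [hC, hS, eq_self_iff_true, true_and, and_true]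
          split_ifs with h1 h2 h3 h3 <;>
            first
            | rfl
            | exact congrArg some (by omega)
            | (exfalso; omega)
        · simp [hS]
      · simp [hC]

lemma altInner (g : Int → Int) (n : Nat) : ∀ (lo hi : Int), hi - lo < (n : Int) → 0 ≤ lo →
    ∀ (r : List Int) (b : Nat),
    ((PySem.List.pyRange lo hi 1).foldl (fun r j => r.set j.toNat (g j)) r)[b]? =
      if lo ≤ (b : Int) ∧ (b : Int) < hi ∧ b < r.length then some (g (b : Int)) else r[b]? := by
  induction n with
  | zero =>
    intro lo hi hn hlo r b
    rw [PySem.List.pyRange_one_eq_nil (by omega)]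
    rw [if_neg (by rintro ⟨h1, h2, -⟩; omega)]
    rfl
  | succ n ih =>
    intro lo hi hn hlo r b
    by_cases hend : hi ≤ lo
    · rw [PySem.List.pyRange_one_eq_nil (by omega)]
      rw [if_neg (by rintro ⟨h1, h2, -⟩; omega)]
      rfl
    · rw [PySem.List.pyRange_one_cons (by omega), List.foldl_cons]
      rw [ih (lo + 1) hi (by omega) (by omega)]
      rw [List.length_set, List.getElem?_set]
      by_cases hb : lo.toNat = b
      · have hbi : (b : Int) = lo := by omega
        split_ifs with h1 h2 h3 h3 <;>
          first
          | rfl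
          | (exfalso; omega)
          | (exact (List.getElem?_eq_none (by omega)).symm)
          | (rw [hbi])
      · split_ifs with h1 h2 h2 <;>
          first
          | rfl
          | (exfalso; omega)

lemma altInner_len (g : Int → Int) (cols : List Int) :
    ∀ (r : List Int), (cols.foldl (fun r j => r.set j.toNat (g j)) r).length = r.length := by
  induction cols with
  | nil => intro r; rfl
  | cons c cols ih => intro r; rw [List.foldl_cons, ih, List.length_set]

lemma shape_set_row (m : List (List Int)) (k : Nat) (r' : List Int)
    (h : ∀ r, m[k]? = some r → r'.length = r.length) :
    (m.set k r').map List.length = m.map List.length := by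
  apply List.ext_getElem?
  intro a
  simp only [List.getElem?_map, List.getElem?_set]
  by_cases hk : k = a
  · subst hk
    by_cases hl : k < m.length
    · rw [if_pos rfl, if_pos hl]
      cases hm : m[k]? with
      | none => exact absurd (List.getElem?_eq_getElem hl) (by rw [hm]; simp)
      | some r => simp [hm, h r hm]
    · rw [if_pos rfl, if_neg hl, List.getElem?_eq_none (by omega)]
  · rw [if_neg hk]

def bstep (dim half : Int) (m : List (List Int)) (i : Int) : List (List Int) :=
  let cr : Int := if i < half then half - 1 else half
  let row := (PySem.List.pyGet? m i).getD []
  let row' := (PySem.List.pyRange 0 dim 1).foldl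
    (fun r j =>
      let cc : Int := if j < half then half - 1 else half
      r.set j.toNat (|i - cr| + |j - cc|)) row
  m.set i.toNat row'

lemma bstep_eq (dim half : Int) (m : List (List Int)) (i : Int) :
    bstep dim half m i
    = m.set i.toNat ((PySem.List.pyRange 0 dim 1).foldl
        (fun r j => r.set j.toNat (|i - (if i < half then half - 1 else half)| +
          |j - (if j < half then half - 1 else half)|))
        ((PySem.List.pyGet? m i).getD [])) := rfl

lemma altOuter (dim half : Int) (n : Nat) : ∀ (lo : Int), dim - lo < (n : Int) → 0 ≤ lo →
    ∀ m (a b : Nat),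
    gget ((PySem.List.pyRange lo dim 1).foldl (bstep dim half) m) a b =
      if lo ≤ (a : Int) ∧ (a : Int) < dim ∧ (b : Int) < dim ∧ Sh m a b
      then some (|(a : Int) - (if (a : Int) < half then half - 1 else half)| +
                 |(b : Int) - (if (b : Int) < half then half - 1 else half)|)
      else gget m a b := by
  induction n with
  | zero =>
    intro lo hn hlo m a b
    rw [PySem.List.pyRange_one_eq_nil (a := lo) (b := dim) (by omega)]
    rw [if_neg (by rintro ⟨h1, h2, -, -⟩; omega)]
    rfl
  | succ n ih =>
    intro lo hn hlo m a b
    by_cases hend : dim ≤ lo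
    · rw [PySem.List.pyRange_one_eq_nil (a := lo) (b := dim) (by omega)]
      rw [if_neg (by rintro ⟨h1, h2, -, -⟩; omega)]
      rfl
    · rw [PySem.List.pyRange_one_cons (a := lo) (b := dim) (by omega), List.foldl_cons, bstep_eq]
      have hg : PySem.List.pyGet? m lo = m[lo.toNat]? := PySem.List.pyGet?_of_nonneg m hlo
      cases hmk : m[lo.toNat]? with
      | none =>
        have hlen : m.length ≤ lo.toNat := by
          by_contra hc
          push_neg at hc
          rw [List.getElem?_eq_getElem hc] at hmk
          simp at hmk
        have hrow : (PySem.List.pyGet? m lo).getD [] = ([] : List Int) := by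
          rw [hg, hmk]; rfl
        rw [hrow]
        have hrow' : ((PySem.List.pyRange 0 dim 1).foldl
            (fun r j => r.set j.toNat (|lo - (if lo < half then half - 1 else half)| +
              |j - (if j < half then half - 1 else half)|)) ([] : List Int)) = [] := by
          apply List.eq_nil_of_length_eq_zero
          rw [altInner_len]
          rfl
        rw [hrow', List.set_eq_of_length_le (by omega)]
        rw [ih (lo + 1) (by omega) (by omega)]
        have hShA : ∀ (b' : Nat), Sh m lo.toNat b' = false := by
          intro b'
          simp [Sh, List.getD, List.getElem?_map, hmk]
        by_cases hA : a = lo.toNat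
        · rw [if_neg (by rw [hA]; rintro ⟨-, -, -, h⟩; rw [hShA] at h; exact absurd h (by simp))]
          rw [if_neg (by rw [hA]; rintro ⟨-, -, -, h⟩; rw [hShA] at h; exact absurd h (by simp))]
        · have : ((lo + 1 ≤ (a : Int) ∧ (a : Int) < dim ∧ (b : Int) < dim ∧ Sh m a b) ↔
              (lo ≤ (a : Int) ∧ (a : Int) < dim ∧ (b : Int) < dim ∧ Sh m a b)) := by
            constructor
            · rintro ⟨h1, h2, h3, h4⟩; exact ⟨by omega, h2, h3, h4⟩
            · rintro ⟨h1, h2, h3, h4⟩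
              refine ⟨?_, h2, h3, h4⟩
              have : (a : Int) ≠ lo := by omega
              omega
          rw [if_congr this rfl rfl]
      | some r =>
        have hk : lo.toNat < m.length := by
          by_contra hc
          rw [List.getElem?_eq_none (by omega)] at hmk
          exact absurd hmk (by simp)
        have hrow : (PySem.List.pyGet? m lo).getD [] = r := by rw [hg, hmk]; rfl
        rw [hrow, ih (lo + 1) (by omega) (by omega)]
        have hlen' : ((PySem.List.pyRange 0 dim 1).foldl
            (fun r' j => r'.set j.toNat (|lo - (if lo < half then half - 1 else half)| +
              |j - (if j < half then half - 1 else half)|)) r).length = r.length :=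
          altInner_len _ _ r
        have hsh : (m.set lo.toNat _).map List.length = m.map List.length :=
          shape_set_row m lo.toNat _ (fun r0 h0 => by rw [hmk] at h0; cases h0; exact hlen')
        have hShEq : ∀ (a' b' : Nat), Sh (m.set lo.toNat ((PySem.List.pyRange 0 dim 1).foldl
            (fun r' j => r'.set j.toNat (|lo - (if lo < half then half - 1 else half)| +
              |j - (if j < half then half - 1 else half)|)) r)) a' b' = Sh m a' b' := by
          intro a' b'
          unfold Sh
          rw [hsh]
        simp only [hShEq]
        have hrowb := altInner (fun j => |lo - (if lo < half then half - 1 else half)| +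
            |j - (if j < half then half - 1 else half)|) (dim.toNat + 1) 0 dim
            (by omega) (by omega) r b
        by_cases hA : a = lo.toNat
        · have hai : ((a : Nat) : Int) = lo := by omega
          have hgm' : ∀ (X : List Int), gget (m.set lo.toNat X) a b = X[b]? := by
            intro X
            unfold gget
            rw [hA, List.getElem?_set_self hk]
            rfl
          have hSm : (Sh m a b : Prop) ↔ b < r.length := by
            rw [hA]
            simp [Sh, List.getD, List.getElem?_map, hmk]
          have hgm : gget m a b = r[b]? := by
            unfold gget
            rw [hA, hmk]
            rfl
          rw [if_neg (show ¬(lo + 1 ≤ ((a : Nat) : Int) ∧ ((a : Nat) : Int) < dim ∧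
              ((b : Nat) : Int) < dim ∧ Sh m a b = true) from by rintro ⟨h1, -⟩; omega),
            hgm', hrowb, hgm]
          by_cases hb : (b : Int) < dim ∧ b < r.length
          · rw [if_pos (show (0 : Int) ≤ ((b : Nat) : Int) ∧ ((b : Nat) : Int) < dim ∧
                b < r.length from ⟨by omega, hb.1, hb.2⟩)]
            rw [if_pos (show lo ≤ ((a : Nat) : Int) ∧ ((a : Nat) : Int) < dim ∧
                ((b : Nat) : Int) < dim ∧ Sh m a b = true from
                ⟨by omega, by omega, hb.1, hSm.mpr hb.2⟩)]
            rw [hai]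
          · rw [if_neg (show ¬((0 : Int) ≤ ((b : Nat) : Int) ∧ ((b : Nat) : Int) < dim ∧
                b < r.length) from by rintro ⟨-, h2, h3⟩; exact hb ⟨h2, h3⟩)]
            rw [if_neg (show ¬(lo ≤ ((a : Nat) : Int) ∧ ((a : Nat) : Int) < dim ∧
                ((b : Nat) : Int) < dim ∧ Sh m a b = true) from
                by rintro ⟨-, -, h3, h4⟩; exact hb ⟨h3, hSm.mp h4⟩)]
        · have hne : lo.toNat ≠ a := fun h => hA h.symm
          have hnea : ¬((a : Nat) : Int) = lo := by omega
          have hgm' : ∀ (X : List Int), gget (m.set lo.toNat X) a b = gget m a b := by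
            intro X
            unfold gget
            rw [List.getElem?_set_ne hne]
          rw [hgm']
          refine if_congr ?_ rfl rfl
          constructor
          · rintro ⟨h1, h2, h3, h4⟩; exact ⟨by omega, h2, h3, h4⟩
          · rintro ⟨h1, h2, h3, h4⟩; exact ⟨by omega, h2, h3, h4⟩

lemma shape_bfold (dim half : Int) (is : List Int) :
    ∀ m, (∀ i ∈ is, 0 ≤ i) →
      ((is.foldl (bstep dim half) m).map List.length) = m.map List.length := by
  induction is with
  | nil => intro m _; rfl
  | cons i is ih =>
    intro m hpos
    rw [List.foldl_cons, ih _ (fun j hj => hpos j (List.mem_cons_of_mem _ hj))]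
    rw [bstep_eq]
    have hi : (0 : Int) ≤ i := hpos i List.mem_cons_self
    have hg : PySem.List.pyGet? m i = m[i.toNat]? := PySem.List.pyGet?_of_nonneg m hi
    cases hmk : m[i.toNat]? with
    | none =>
      have hlen : m.length ≤ i.toNat := by
        by_contra hc
        push_neg at hc
        rw [List.getElem?_eq_getElem hc] at hmk
        simp at hmk
      rw [List.set_eq_of_length_le hlen]
    | some r =>
      apply shape_set_row
      intro r0 h0
      rw [hmk] at h0
      cases h0
      rw [altInner_len, hg, hmk]
      rfl

-- ===== VERDICT (by name: the statement is the Claim_ definition above) =====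
theorem manhattan_nowall_spec : Claim_equal_manhattan_nowall := by
  unfold Claim_equal_manhattan_nowall
  intro maze _ _
  unfold Spec_manhattan_nowall
  set d : Nat := (maze.headD []).length with hd
  set dim : Int := ((d : Nat) : Int) with hdim
  set s : Int := Int.tdiv (dim - 2) 2 with hs
  set h : Int := Int.tdiv dim 2 with hh
  set half : Int := PySem.Int.floordiv dim 2 with hhalf
  -- arithmetic characterisations, as hypotheses omega can use
  have hhv : h = ((d / 2 : Nat) : Int) := by
    rw [hh, hdim, Int.tdiv_eq_ediv_of_nonneg (by omega)]
    omega
  have hhalfv : half = ((d / 2 : Nat) : Int) := by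
    rw [hhalf, hdim, PySem.Int.floordiv_eq_ediv_of_pos (by omega)]
    omega
  have hsv : s = if d = 0 then -1 else if d = 1 then 0 else ((d / 2 : Nat) : Int) - 1 := by
    rw [hs, hdim]
    rcases Nat.lt_or_ge d 2 with hlt | hge
    · interval_cases d <;> decide
    · rw [if_neg (by omega), if_neg (by omega),
        Int.tdiv_eq_ediv_of_nonneg (by omega)]
      omega
  have harith : (2 ≤ d ∧ s = ((d / 2 : Nat) : Int) - 1) ∨ (d = 1 ∧ s = 0) ∨
      (d = 0 ∧ s = -1) := by
    by_cases h0 : d = 0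
    · exact Or.inr (Or.inr ⟨h0, by rw [hsv, if_pos h0]⟩)
    · by_cases h1 : d = 1
      · exact Or.inr (Or.inl ⟨h1, by rw [hsv, if_neg h0, if_pos h1]⟩)
      · exact Or.inl ⟨by omega, by rw [hsv, if_neg h0, if_neg h1]⟩
  -- inner-loop characterisations in the exact shape outerDesc/outerAsc expect
  have hcolsDesc : ∀ (i : Int) m v (a b : Nat),
      gget ((innerGo i (PySem.List.pyRange s (-1) (-1)) m v).1) a b =
        if a = i.toNat ∧ ((fun (b : Nat) => ((b : Int) ≤ s)) b) ∧ Sh m a b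
        then some (v + ((fun (b : Nat) => (s - (b : Int))) b)) else gget m a b := by
    intro i m v a b
    exact innerDesc (d + 1) s i (by omega) m v a b
  have hcolsAsc : ∀ (i : Int) m v (a b : Nat),
      gget ((innerGo i (PySem.List.pyRange h dim 1) m v).1) a b =
        if a = i.toNat ∧ ((fun (b : Nat) => (h ≤ (b : Int) ∧ (b : Int) < dim)) b) ∧ Sh m a b
        then some (v + ((fun (b : Nat) => ((b : Int) - h)) b)) else gget m a b := by
    intro i m v a b
    rw [innerAsc (d + 1) h dim i (by omega) (by omega) m v a b]
    exact if_congr (by tauto) rfl rfl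
  have hpos : ∀ i ∈ PySem.List.pyRange 0 dim 1, (0 : Int) ≤ i := by
    intro i hi
    have := (PySem.List.mem_pyRange_one).mp hi
    omega
  -- unfold both programs to their pass/fold forms and compare pointwise
  have hA : manhattan_nowall maze =
      passGo (PySem.List.pyRange h dim 1) (PySem.List.pyRange h dim 1)
        (passGo (PySem.List.pyRange s (-1) (-1)) (PySem.List.pyRange h dim 1)
          (passGo (PySem.List.pyRange h dim 1) (PySem.List.pyRange s (-1) (-1))
            (passGo (PySem.List.pyRange s (-1) (-1)) (PySem.List.pyRange s (-1) (-1))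
              maze (-1)) (-1)) (-1)) (-1) := rfl
  have hB : manhattan_nowall_alt maze =
      (PySem.List.pyRange 0 dim 1).foldl (bstep dim half) maze := rfl
  rw [hA, hB]
  apply grid_ext
  · rw [shape_passGo, shape_passGo, shape_passGo, shape_passGo,
      shape_bfold dim half _ maze hpos]
  · intro a b
    rw [outerAsc _ _ _ hcolsAsc (d + 1) h dim (by omega) (by omega)]
    rw [outerAsc _ _ _ hcolsDesc (d + 1) h dim (by omega) (by omega)]
    rw [outerDesc _ _ _ hcolsAsc (d + 1) s (by omega)]
    rw [outerDesc _ _ _ hcolsDesc (d + 1) s (by omega)]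
    rw [altOuter dim half (d + 1) 0 (by omega) (by omega)]
    have hSh1 : Sh (passGo (PySem.List.pyRange s (-1) (-1))
        (PySem.List.pyRange s (-1) (-1)) maze (-1)) a b = Sh maze a b := by
      unfold Sh; rw [shape_passGo]
    have hSh2 : Sh (passGo (PySem.List.pyRange h dim 1)
        (PySem.List.pyRange s (-1) (-1))
        (passGo (PySem.List.pyRange s (-1) (-1)) (PySem.List.pyRange s (-1) (-1))
          maze (-1)) (-1)) a b = Sh maze a b := by
      unfold Sh; rw [shape_passGo, shape_passGo]
    have hSh3 : Sh (passGo (PySem.List.pyRange s (-1) (-1))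
        (PySem.List.pyRange h dim 1)
        (passGo (PySem.List.pyRange h dim 1) (PySem.List.pyRange s (-1) (-1))
          (passGo (PySem.List.pyRange s (-1) (-1)) (PySem.List.pyRange s (-1) (-1))
            maze (-1)) (-1)) (-1)) a b = Sh maze a b := by
      unfold Sh; rw [shape_passGo, shape_passGo, shape_passGo]
    rw [hSh1, hSh2, hSh3]
    cases hS : Sh maze a b with
    | false => simp only [hS, Bool.false_eq_true, and_false, if_false]
    | true =>
      simp only [hS, eq_self_iff_true, and_true]
      split_ifs <;>
        first
        | rfl
        | (exfalso; omega)
        | exact congrArg some (by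
            rw [abs_of_nonneg (by omega), abs_of_nonneg (by omega)]; omega)
        | exact congrArg some (by
            rw [abs_of_nonneg (by omega), abs_of_nonpos (by omega)]; omega)
        | exact congrArg some (by
            rw [abs_of_nonpos (by omega), abs_of_nonneg (by omega)]; omega)
        | exact congrArg some (by
            rw [abs_of_nonpos (by omega), abs_of_nonpos (by omega)]; omega)
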